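-- pv_equiv track=rewrite | github.com/alunosnet/PSI_2024_25_M04 | ultimo_nome_primeiro.py | AlteraNome
-- ===== SOURCE A (Python) =====
-- def AlteraNome(nome) -> str:
--     #separar os nomes
--     nomes = nome.split(" ")
--     #verificar se é só um nome
--     if len(nomes)==1:
--         return nome
--     #criar uma string com o ultimo nome e ,
--     nome_alterado = nomes[len(nomes)-1] + ", "
--     #juntar na string os restantes nomes
--     for n in nomes[:len(nomes)-1]:
--         nome_alterado = nome_alterado + n + " "
--     return nome_alterado.strip()
-- ===== SOURCE B (Python) =====
-- def AlteraNome(nome) -> str: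
--     # find the last space; no token list, no loop
--     i = nome.rfind(" ")
--     if i == -1:
--         return nome
--     return (nome[i + 1:] + ", " + nome[:i]).strip()
-- ===== Notes on version B (the rewrite author's own statement) =====
-- stated objective: simpler
-- what changed: Replaces the split-into-token-list plus accumulation loop with a single right-anchored search: find the last space with rfind and slice the string into last word and prefix.
import Mathlib
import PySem

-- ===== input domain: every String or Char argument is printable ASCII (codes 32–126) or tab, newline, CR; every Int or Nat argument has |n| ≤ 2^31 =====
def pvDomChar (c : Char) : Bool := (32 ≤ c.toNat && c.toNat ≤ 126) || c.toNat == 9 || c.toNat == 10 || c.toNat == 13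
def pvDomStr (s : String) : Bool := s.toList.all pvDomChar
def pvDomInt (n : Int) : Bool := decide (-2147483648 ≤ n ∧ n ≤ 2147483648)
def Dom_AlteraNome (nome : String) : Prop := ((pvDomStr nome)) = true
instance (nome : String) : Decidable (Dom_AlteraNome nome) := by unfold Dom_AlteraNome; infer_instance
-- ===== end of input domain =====

-- B replaces A's split-into-token-list plus accumulation loop by one rfind of the last space and two slices (simpler; same cost).

-- ===== PORT A =====
def AlteraNome (nome : String) : String :=
  if (PySem.Chars.splitOn nome.toList [' ']).length == 1 then nome
  else
    String.ofList (PySem.Chars.strip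
      ((PySem.List.slice (PySem.Chars.splitOn nome.toList [' ']) none
          (some (((PySem.Chars.splitOn nome.toList [' ']).length : Int) - 1))).foldl
        (fun acc n => acc ++ n ++ [' '])
        (PySem.List.pyGetD (PySem.Chars.splitOn nome.toList [' '])
          (((PySem.Chars.splitOn nome.toList [' ']).length : Int) - 1) [] ++ [',', ' '])))

-- ===== PORT B =====
def AlteraNome_alt (nome : String) : String :=
  if PySem.Chars.rfind nome.toList [' '] == -1 then nome
  else
    String.ofList (PySem.Chars.strip
      (PySem.Chars.slice nome.toList (some (PySem.Chars.rfind nome.toList [' '] + 1)) none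
        ++ [',', ' '] ++ PySem.Chars.slice nome.toList none (some (PySem.Chars.rfind nome.toList [' ']))))

-- ===== PRECONDITION & SPEC =====
def Spec_AlteraNome (nome : String) (out : String) : Prop := out = AlteraNome_alt nome
instance (nome : String) (out : String) : Decidable (Spec_AlteraNome nome out) := by unfold Spec_AlteraNome; infer_instance

-- ===== CLAIM (what is proved, stated in full; the proofs are below) =====
def Claim_equal_AlteraNome : Prop := ∀ (nome : String), Dom_AlteraNome nome → Spec_AlteraNome nome (AlteraNome nome)

-- ===== LEMMAS AND PROOFS =====

-- structural model of Python's s.split(sep) for a single-character separator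
def pvSplit (c : Char) : List Char → List (List Char)
  | [] => [[]]
  | x :: xs => if x = c then [] :: pvSplit c xs else (pvSplit c xs).modifyHead (x :: ·)

theorem pvSplit_exists (c : Char) (l : List Char) : ∃ h t, pvSplit c l = h :: t := by
  cases l with
  | nil => exact ⟨[], [], rfl⟩
  | cons x xs =>
    simp only [pvSplit]
    split
    · exact ⟨[], pvSplit c xs, rfl⟩
    · obtain ⟨h, t, ht⟩ := pvSplit_exists c xs
      exact ⟨x :: h, t, by rw [ht]; rfl⟩

theorem splitOn_go_eq (c : Char) : ∀ (fuel : Nat) (l cur : List Char) (accs : List (List Char)),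
    l.length ≤ fuel →
    PySem.Chars.splitOn.go [c] fuel l cur accs =
      accs.reverse ++ (pvSplit c l).modifyHead (cur.reverse ++ ·) := by
  intro fuel
  induction fuel with
  | zero =>
    intro l cur accs hl
    have : l = [] := List.length_eq_zero_iff.mp (Nat.le_zero.mp hl)
    subst this
    simp [PySem.Chars.splitOn.go, pvSplit]
  | succ fuel ih =>
    intro l cur accs hl
    cases l with
    | nil => simp [PySem.Chars.splitOn.go, pvSplit]
    | cons x rest =>
      by_cases hx : x = c
      · subst hx
        have hpre : [x].isPrefixOf (x :: rest) = true := by simp [List.isPrefixOf]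
        simp only [PySem.Chars.splitOn.go, hpre, if_true]
        have hdrop : List.drop [x].length (x :: rest) = rest := rfl
        rw [hdrop, ih rest [] (cur.reverse :: accs) (by simpa using Nat.le_of_succ_le_succ hl)]
        obtain ⟨h, t, ht⟩ := pvSplit_exists x rest
        simp [pvSplit, ht]
      · have hpre : [c].isPrefixOf (x :: rest) = false := by
          simp only [List.isPrefixOf, Bool.and_true, beq_eq_false_iff_ne, ne_eq]
          exact fun h => hx h.symm
        simp only [PySem.Chars.splitOn.go, hpre]
        rw [if_neg (by simp)]
        rw [ih rest (x :: cur) accs (by simpa using Nat.le_of_succ_le_succ hl)]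
        obtain ⟨h, t, ht⟩ := pvSplit_exists c rest
        simp [pvSplit, hx, ht, List.modifyHead]

theorem splitOn_eq_pvSplit (c : Char) (l : List Char) :
    PySem.Chars.splitOn l [c] = pvSplit c l := by
  unfold PySem.Chars.splitOn
  rw [splitOn_go_eq c (l.length + 1) l [] [] (by omega)]
  obtain ⟨h, t, ht⟩ := pvSplit_exists c l
  simp [ht]

theorem pvSplit_no_sep {c : Char} {l : List Char} (h : c ∉ l) : pvSplit c l = [l] := by
  induction l with
  | nil => rfl
  | cons x xs ih =>
    have hx : ¬ x = c := fun hxc => h (hxc ▸ List.mem_cons_self)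
    have hxs : c ∉ xs := fun hm => h (List.mem_cons_of_mem _ hm)
    simp [pvSplit, hx, ih hxs, List.modifyHead]

theorem pvSplit_append (c : Char) (u v : List Char) :
    pvSplit c (u ++ c :: v) = pvSplit c u ++ pvSplit c v := by
  induction u with
  | nil =>
    obtain ⟨h, t, ht⟩ := pvSplit_exists c v
    simp [pvSplit]
  | cons x xs ih =>
    by_cases hx : x = c
    · subst hx; simp [pvSplit, ih]
    · obtain ⟨h', t', ht'⟩ := pvSplit_exists c xs
      rw [List.cons_append]
      simp only [pvSplit, hx, if_false, ih, ht']
      simp [List.modifyHead]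

theorem pvSplit_flat (c : Char) (u : List Char) :
    (pvSplit c u).flatMap (· ++ [c]) = u ++ [c] := by
  induction u with
  | nil => rfl
  | cons x xs ih =>
    by_cases hx : x = c
    · subst hx; simp [pvSplit, ih]
    · obtain ⟨h, t, ht⟩ := pvSplit_exists c xs
      have h2 := ih
      rw [ht] at h2
      simp only [List.flatMap_cons] at h2
      simp only [pvSplit, hx, if_false, ht, List.modifyHead, List.flatMap_cons,
        List.cons_append, h2]

theorem rfind_go_notmem {c : Char} {s : List Char} (h : c ∉ s) :
    ∀ k, PySem.Chars.rfind.go s [c] k = -1 := by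
  intro k
  induction k with
  | zero =>
    have hp : [c].isPrefixOf s = false := by
      cases s with
      | nil => rfl
      | cons x xs =>
        simp only [List.isPrefixOf, Bool.and_true, beq_eq_false_iff_ne, ne_eq]
        intro hc; exact h (hc ▸ List.mem_cons_self)
    simp [PySem.Chars.rfind.go, hp]
  | succ j ih =>
    have hp : [c].isPrefixOf (s.drop (j + 1)) = false := by
      cases hd : s.drop (j + 1) with
      | nil => rfl
      | cons x xs =>
        simp only [List.isPrefixOf, Bool.and_true, beq_eq_false_iff_ne, ne_eq]
        intro hc
        subst hc
        exact h (List.drop_subset _ _ (hd ▸ List.mem_cons_self))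
    simp [PySem.Chars.rfind.go, hp, ih]

theorem rfind_go_last {c : Char} (u v : List Char) (hv : c ∉ v) :
    ∀ k, u.length ≤ k → PySem.Chars.rfind.go (u ++ c :: v) [c] k = u.length := by
  intro k
  induction k with
  | zero =>
    intro hk
    have hu : u = [] := List.length_eq_zero_iff.mp (Nat.le_zero.mp hk)
    subst hu
    simp [PySem.Chars.rfind.go, List.isPrefixOf]
  | succ j ih =>
    intro hk
    by_cases he : u.length = j + 1
    · have hdrop : (u ++ c :: v).drop (j + 1) = c :: v := by
        rw [← he]; simp
      have hp : [c].isPrefixOf ((u ++ c :: v).drop (j + 1)) = true := by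
        rw [hdrop]; simp [List.isPrefixOf]
      simp [PySem.Chars.rfind.go, he]
    · have hle : u.length ≤ j := by omega
      have hdrop : (u ++ c :: v).drop (j + 1) = v.drop (j - u.length) := by
        have h1 : j + 1 = u.length + (j - u.length + 1) := by omega
        rw [h1, List.drop_append]
        have h2 : List.drop (u.length + (j - u.length + 1)) u = [] :=
          List.drop_eq_nil_of_le (by omega)
        have h3 : u.length + (j - u.length + 1) - u.length = (j - u.length) + 1 := by omega
        rw [h2, h3, List.drop_succ_cons, List.nil_append]
      have hp : [c].isPrefixOf ((u ++ c :: v).drop (j + 1)) = false := by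
        rw [hdrop]
        cases hd : v.drop (j - u.length) with
        | nil => rfl
        | cons x xs =>
          simp only [List.isPrefixOf, Bool.and_true, beq_eq_false_iff_ne, ne_eq]
          intro hc
          subst hc
          exact hv (List.drop_subset _ _ (hd ▸ List.mem_cons_self))
      simp [PySem.Chars.rfind.go, hp, ih hle]

theorem rfind_last {c : Char} (u v : List Char) (hv : c ∉ v) :
    PySem.Chars.rfind (u ++ c :: v) [c] = u.length := by
  unfold PySem.Chars.rfind
  exact rfind_go_last u v hv _ (by simp)

theorem rfind_notmem {c : Char} {s : List Char} (h : c ∉ s) :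
    PySem.Chars.rfind s [c] = -1 := by
  unfold PySem.Chars.rfind
  exact rfind_go_notmem h _

theorem strip_append_space (X : List Char) :
    PySem.Chars.strip (X ++ [' ']) = PySem.Chars.strip X := by
  simp only [PySem.Chars.strip, PySem.Chars.lstrip, PySem.Chars.rstrip]
  rw [List.dropWhile_append]
  by_cases he : (X.dropWhile PySem.Chars.isspace).isEmpty
  · have hX : X.dropWhile PySem.Chars.isspace = [] := by
      simpa [List.isEmpty_iff] using he
    rw [if_pos he, hX]
    decide
  · rw [if_neg he]
    have h1 : (X.dropWhile PySem.Chars.isspace ++ [' ']).reverse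
        = ' ' :: (X.dropWhile PySem.Chars.isspace).reverse := by simp
    rw [h1]
    have hsp : PySem.Chars.isspace ' ' = true := by decide
    simp [List.dropWhile, hsp]

theorem last_decomp (c : Char) (l : List Char) (h : c ∈ l) :
    ∃ u v, l = u ++ c :: v ∧ c ∉ v := by
  induction l with
  | nil => cases h
  | cons x xs ih =>
    by_cases hm : c ∈ xs
    · obtain ⟨u, v, huv, hv⟩ := ih hm
      exact ⟨x :: u, v, by rw [huv]; rfl, hv⟩
    · rcases List.mem_cons.mp h with hx | hx
      · subst hx
        exact ⟨[], xs, rfl, hm⟩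
      · exact absurd hx hm

-- ===== VERDICT (by name: the statement is the Claim_ definition above) =====
theorem AlteraNome_spec : Claim_equal_AlteraNome := by
  intro nome _
  unfold Spec_AlteraNome AlteraNome AlteraNome_alt
  by_cases hc : ' ' ∈ nome.toList
  · obtain ⟨u, v, huv, hv⟩ := last_decomp ' ' nome.toList hc
    rw [huv, splitOn_eq_pvSplit, pvSplit_append, pvSplit_no_sep hv,
        rfind_last u v hv]
    have hlen : (pvSplit ' ' u ++ [v]).length = (pvSplit ' ' u).length + 1 := by simp
    have hL1 : 1 ≤ (pvSplit ' ' u).length := by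
      obtain ⟨h, t, ht⟩ := pvSplit_exists ' ' u; rw [ht]; simp
    have hbeq : ((pvSplit ' ' u ++ [v]).length == 1) = false := by
      rw [hlen]
      simp only [beq_eq_false_iff_ne, ne_eq]
      omega
    have hieq : ((u.length : Int) == -1) = false := by
      simp only [beq_eq_false_iff_ne, ne_eq]
      omega
    rw [hbeq, hieq]
    simp only [Bool.false_eq_true, if_false]
    have hcast : (((pvSplit ' ' u ++ [v]).length : Int) - 1)
        = ((pvSplit ' ' u).length : Int) := by rw [hlen]; push_cast; ring
    have hidx : PySem.List.pyGetD (pvSplit ' ' u ++ [v])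
        (((pvSplit ' ' u ++ [v]).length : Int) - 1) [] = v := by
      rw [hcast, PySem.List.pyGetD_natCast]
      simp [List.getD]
    have hslice : PySem.List.slice (pvSplit ' ' u ++ [v]) none
        (some (((pvSplit ' ' u ++ [v]).length : Int) - 1)) = pvSplit ' ' u := by
      rw [hcast, PySem.List.slice_to _ (by omega)]
      simp
    rw [hidx, hslice]
    have hsliceB1 : PySem.Chars.slice (u ++ ' ' :: v) (some ((u.length : Int) + 1)) none = v := by
      simp only [PySem.Chars.slice_eq_listSlice]
      rw [PySem.List.slice_from _ (by omega)]
      have h1 : ((u.length : Int) + 1).toNat = u.length + 1 := by omega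
      rw [h1]
      simp
    have hsliceB2 : PySem.Chars.slice (u ++ ' ' :: v) none (some (u.length : Int)) = u := by
      simp only [PySem.Chars.slice_eq_listSlice]
      rw [PySem.List.slice_to _ (by omega)]
      simp
    rw [hsliceB1, hsliceB2]
    have hbody : (fun (acc n : List Char) => acc ++ n ++ [' '])
        = fun (acc n : List Char) => acc ++ (n ++ [' ']) := by
      funext acc n; simp
    rw [hbody, PySem.List.foldl_append_eq_flatMap, pvSplit_flat]
    have hassoc : (v ++ [',', ' ']) ++ (u ++ [' ']) = ((v ++ [',', ' ']) ++ u) ++ [' '] := by simp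
    rw [hassoc, strip_append_space]
  · rw [splitOn_eq_pvSplit, pvSplit_no_sep hc, rfind_notmem hc]
    simp
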